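-- pv_equiv track=rewrite | github.com/SAlNT666/stepik_learning | programming_contests/programming_contests_2/repeat_repeat_repeat.py | get_repetition
-- ===== SOURCE A (Python) =====
-- def get_repetition(s):
--     len_s = len(s)
--     res = 1
--     for i in range(1, len_s // 2 + 1):
--         if len_s % i == 0:
--             if len(s.replace(s[:i], '')) == 0:
--                 res = s.count(s[:i])
--                 break
--
--     return res
-- ===== SOURCE B (Python) =====
-- def get_repetition(s):
--     if s == "":
--         return 1
--     period = (s + s).find(s, 1)
--     return len(s) // period
-- ===== Notes on version B (the rewrite author's own statement) =====
-- stated objective: faster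
-- what changed: Replaces the divisor loop with replace/count checks by the classic rotation trick: the smallest period of s is (s+s).find(s, 1), and the answer is len(s) // period.
import Mathlib
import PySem

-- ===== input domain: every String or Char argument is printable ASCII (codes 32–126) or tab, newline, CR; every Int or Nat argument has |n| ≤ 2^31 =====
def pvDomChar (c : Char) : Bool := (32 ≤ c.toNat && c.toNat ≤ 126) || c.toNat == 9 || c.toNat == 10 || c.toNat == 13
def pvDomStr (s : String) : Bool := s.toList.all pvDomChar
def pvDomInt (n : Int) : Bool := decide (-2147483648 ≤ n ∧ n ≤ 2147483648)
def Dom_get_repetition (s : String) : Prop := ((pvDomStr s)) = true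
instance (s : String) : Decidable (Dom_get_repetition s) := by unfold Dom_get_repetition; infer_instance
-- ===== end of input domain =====

-- B replaces A's divisor loop (replace/count test per divisor) by the rotation trick:
-- the smallest period of s is (s+s).find(s, 1); answer = len(s) // period. Measured faster.

-- ===== PORT A =====
-- the for-loop with `break` and final `return res`: the first qualifying i returns
-- s.count(s[:i]) (the value assigned to res before the break), else res stays 1
def getRepLoop (s : String) (len_s : Int) : List Int → Int
  | [] => 1
  | i :: rest =>
    if PySem.Int.mod len_s i = 0 then
      if PySem.Str.len (PySem.Str.replace s (PySem.Str.slice s none (some i)) "") = 0 then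
        ((PySem.Str.count s (PySem.Str.slice s none (some i)) : Nat) : Int)
      else getRepLoop s len_s rest
    else getRepLoop s len_s rest

def get_repetition (s : String) : Int :=
  getRepLoop s (PySem.Str.len s)
    (PySem.List.pyRange 1 (PySem.Int.floordiv (PySem.Str.len s) 2 + 1))

-- ===== PORT B =====
def get_repetition_alt (s : String) : Int :=
  if s = "" then 1
  else PySem.Int.floordiv (PySem.Str.len s) (PySem.Str.findFrom (s ++ s) s 1 none)

-- ===== PRECONDITION & SPEC =====
def Spec_get_repetition (s : String) (out : Int) : Prop := out = get_repetition_alt s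
instance (s : String) (out : Int) : Decidable (Spec_get_repetition s out) := by unfold Spec_get_repetition; infer_instance

-- ===== CLAIM (what is proved, stated in full; the proofs are below) =====
def Claim_equal_get_repetition : Prop := ∀ (s : String), Dom_get_repetition s → Spec_get_repetition s (get_repetition s)

-- ===== LEMMAS AND PROOFS =====

-- k copies of t concatenated
def repw (t : List Char) (k : Nat) : List Char := (List.replicate k t).flatten

theorem length_repw (t : List Char) (k : Nat) : (repw t k).length = k * t.length := by
  simp [repw, List.length_flatten]

theorem repw_succ (t : List Char) (k : Nat) : repw t (k + 1) = t ++ repw t k := by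
  simp [repw, List.replicate_succ]

theorem repw_succ' (t : List Char) (k : Nat) : repw t (k + 1) = repw t k ++ t := by
  rw [repw, List.replicate_succ']; simp [repw]

-- cs is a concatenation of copies of its length-i prefix
def PerP (cs : List Char) (i : Nat) : Prop := ∃ k, cs = repw (cs.take i) k

theorem comm_pow (u : List Char) (hu : u ≠ []) :
    ∀ (N : Nat) (v : List Char), v.length ≤ N → u ++ v = v ++ u → u.length ∣ v.length →
      v = repw u (v.length / u.length) := by
  intro N
  induction N with
  | zero =>
    intro v hv _ _
    have hv0 : v = [] := List.length_eq_zero_iff.mp (Nat.le_zero.mp hv)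
    subst hv0; simp [repw]
  | succ N ih =>
    intro v hv hc hd
    by_cases hv0 : v = []
    · subst hv0; simp [repw]
    · have hupos : 0 < u.length := List.length_pos_iff.mpr hu
      have hvpos : 0 < v.length := List.length_pos_iff.mpr hv0
      have hle : u.length ≤ v.length := Nat.le_of_dvd hvpos hd
      have hpre : u <+: v := by
        have h1 : (u ++ v).take u.length = u := List.take_left
        have h2 : (v ++ u).take u.length = v.take u.length :=
          List.take_append_of_le_length hle
        rw [hc, h2] at h1
        exact ⟨v.drop u.length, by nth_rewrite 2 [← List.take_append_drop u.length v]; rw [h1]⟩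
      obtain ⟨w, rfl⟩ := hpre
      have hc' : u ++ w = w ++ u := by
        rw [List.append_assoc] at hc
        exact List.append_cancel_left hc
      have hd' : u.length ∣ w.length := by
        rw [List.length_append] at hd
        exact (Nat.dvd_add_right (dvd_refl u.length)).mp hd
      have hw : w.length ≤ N := by
        rw [List.length_append] at hv; omega
      have hrec := ih w hw hc' hd'
      have hlen : (u ++ w).length / u.length = w.length / u.length + 1 := by
        rw [List.length_append, Nat.add_comm, Nat.add_div_right _ hupos]
      rw [hlen, repw_succ]
      nth_rewrite 1 [hrec]
      rfl

theorem rotate_mul (cs : List Char) (p : Nat) (hr : cs.rotate p = cs) :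
    ∀ q, cs.rotate (p * q) = cs := by
  intro q
  induction q with
  | zero => simp
  | succ q ih =>
    have : p * (q + 1) = p * q + p := by ring
    rw [this, ← List.rotate_rotate, ih, hr]

theorem cond_equiv (cs : List Char) (j : Nat) (hj : j ≤ cs.length) :
    (cs <+: (cs ++ cs).drop j) ↔ cs.rotate j = cs := by
  rw [List.drop_append_of_le_length hj]
  rw [List.prefix_iff_eq_take]
  rw [List.take_append]
  have h1 : (cs.drop j).take cs.length = cs.drop j :=
    List.take_of_length_le (by simp)
  have h2 : cs.length - (cs.drop j).length = j := by simp; omega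
  rw [h1, h2, List.rotate_eq_drop_append_take hj]
  exact eq_comm

theorem per_imp (cs : List Char) (i : Nat) (h1 : 1 ≤ i) (h2 : i ≤ cs.length) :
    PerP cs i → i ∣ cs.length ∧ cs.rotate i = cs := by
  rintro ⟨k, hk⟩
  have htlen : (cs.take i).length = i := by simp; omega
  have hlen : cs.length = k * i := by
    conv_lhs => rw [hk]
    rw [length_repw, htlen]
  constructor
  · exact ⟨k, by rw [hlen, Nat.mul_comm]⟩
  · have hk1 : 1 ≤ k := by
      rcases Nat.eq_zero_or_pos k with h | h
      · exfalso; rw [h] at hlen; omega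
      · exact h
    obtain ⟨k', rfl⟩ := Nat.exists_eq_add_of_le hk1
    rw [List.rotate_eq_drop_append_take h2]
    set t := cs.take i with htdef
    have hsplit : cs = t ++ repw t k' := by
      conv_lhs => rw [hk]
      rw [Nat.add_comm, repw_succ]
    have hdrop : cs.drop i = repw t k' := by
      conv_lhs => rw [hsplit]
      have : i = t.length := htlen.symm
      rw [this, List.drop_left]
    rw [hdrop]
    conv_rhs => rw [hk]
    rw [Nat.add_comm, repw_succ']

theorem rot_imp (cs : List Char) (i : Nat) (h1 : 1 ≤ i) (h2 : i ≤ cs.length)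
    (hd : i ∣ cs.length) (hr : cs.rotate i = cs) : PerP cs i := by
  have htlen : (cs.take i).length = i := by simp; omega
  have hne : cs.take i ≠ [] := by
    intro h; rw [h] at htlen; simp at htlen; omega
  have hcomm : cs.take i ++ cs.drop i = cs.drop i ++ cs.take i := by
    rw [List.take_append_drop]
    rw [List.rotate_eq_drop_append_take h2] at hr
    exact hr.symm
  have hd' : (cs.take i).length ∣ (cs.drop i).length := by
    rw [htlen, List.length_drop]
    exact Nat.dvd_sub hd (dvd_refl i)
  have := comm_pow (cs.take i) hne (cs.drop i).length (cs.drop i) le_rfl hcomm hd'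
  refine ⟨(cs.drop i).length / (cs.take i).length + 1, ?_⟩
  conv_lhs => rw [← List.take_append_drop i cs]
  rw [repw_succ]
  congr 1

theorem replace_go_repw (t : List Char) (ht : t ≠ []) :
    ∀ (k fuel : Nat) (acc : List Char), (repw t k).length ≤ fuel →
      PySem.Chars.replace.go t [] fuel (repw t k) acc = acc.reverse := by
  intro k
  induction k with
  | zero =>
    intro fuel acc _
    have h0 : repw t 0 = [] := rfl
    rw [h0]
    cases fuel with
    | zero => simp [PySem.Chars.replace.go]
    | succ f => rfl
  | succ k ih =>
    intro fuel acc hf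
    have hpos : 0 < t.length := List.length_pos_iff.mpr ht
    have hlen : (repw t (k+1)).length = (k+1) * t.length := length_repw t (k+1)
    obtain ⟨c, ts, hct⟩ := List.exists_cons_of_ne_nil ht
    cases fuel with
    | zero =>
      exfalso; rw [hlen] at hf
      have := Nat.mul_pos (show 0 < k+1 by omega) hpos
      omega
    | succ f =>
      have hsp : repw t (k+1) = t ++ repw t k := repw_succ t k
      have hcons : repw t (k+1) = c :: (ts ++ repw t k) := by rw [hsp, hct]; rfl
      rw [hcons]
      have hunf : PySem.Chars.replace.go t [] (f+1) (c :: (ts ++ repw t k)) acc =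
          (if t.isPrefixOf (c :: (ts ++ repw t k)) then
            PySem.Chars.replace.go t [] f (List.drop t.length (c :: (ts ++ repw t k))) acc
           else PySem.Chars.replace.go t [] f (ts ++ repw t k) (c :: acc)) := by
        simp [PySem.Chars.replace.go]
      rw [hunf]
      have hpre : t.isPrefixOf (c :: (ts ++ repw t k)) = true := by
        rw [List.isPrefixOf_iff_prefix]
        rw [← hcons, hsp]
        exact List.prefix_append t (repw t k)
      rw [if_pos hpre]
      have hdrop : List.drop t.length (c :: (ts ++ repw t k)) = repw t k := by
        rw [← hcons, hsp, List.drop_left]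
      rw [hdrop]
      exact ih f acc (by rw [hsp] at hf; simp [List.length_append] at hf; omega)

theorem replace_go_nil (t : List Char) (ht : t ≠ []) :
    ∀ (fuel : Nat) (l acc : List Char), l.length ≤ fuel →
      PySem.Chars.replace.go t [] fuel l acc = [] → acc = [] ∧ ∃ k, l = repw t k := by
  intro fuel
  induction fuel with
  | zero =>
    intro l acc hl hgo
    have hl0 : l = [] := List.length_eq_zero_iff.mp (Nat.le_zero.mp hl)
    subst hl0
    have : PySem.Chars.replace.go t [] 0 [] acc = acc.reverse := by
      simp [PySem.Chars.replace.go]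
    rw [this] at hgo
    exact ⟨List.reverse_eq_nil_iff.mp hgo, 0, rfl⟩
  | succ f ih =>
    intro l acc hl hgo
    cases l with
    | nil =>
      have : PySem.Chars.replace.go t [] (f+1) [] acc = acc.reverse := rfl
      rw [this] at hgo
      exact ⟨List.reverse_eq_nil_iff.mp hgo, 0, rfl⟩
    | cons c l' =>
      have hunf : PySem.Chars.replace.go t [] (f+1) (c :: l') acc =
          (if t.isPrefixOf (c :: l') then
            PySem.Chars.replace.go t [] f (List.drop t.length (c :: l')) acc
           else PySem.Chars.replace.go t [] f l' (c :: acc)) := by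
        simp [PySem.Chars.replace.go]
      rw [hunf] at hgo
      by_cases hpre : t.isPrefixOf (c :: l') = true
      · rw [if_pos hpre] at hgo
        have hpos : 0 < t.length := List.length_pos_iff.mpr ht
        have hdl : (List.drop t.length (c :: l')).length ≤ f := by
          simp [List.length_drop] at *; omega
        obtain ⟨hacc, k, hk⟩ := ih _ acc hdl hgo
        refine ⟨hacc, k + 1, ?_⟩
        have hp : t <+: (c :: l') := List.isPrefixOf_iff_prefix.mp hpre
        have : c :: l' = t ++ List.drop t.length (c :: l') := by
          conv_lhs => rw [← List.take_append_drop t.length (c :: l')]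
          congr 1
          exact (List.prefix_iff_eq_take.mp hp).symm
        rw [this, hk, repw_succ]
      · rw [if_neg hpre] at hgo
        obtain ⟨hacc, _⟩ := ih l' (c :: acc) (by simp at hl; omega) hgo
        exact absurd hacc (by simp)

theorem replace_empty_iff (cs t : List Char) (ht : t ≠ []) :
    PySem.Chars.replace cs t [] = [] ↔ ∃ k, cs = repw t k := by
  have hne : t.isEmpty = false := by simp [List.isEmpty_eq_false_iff, ht]
  rw [PySem.Chars.replace, hne]
  simp only [Bool.false_eq_true, if_false]
  constructor
  · intro h
    exact (replace_go_nil t ht cs.length cs [] le_rfl h).2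
  · rintro ⟨k, rfl⟩
    exact replace_go_repw t ht k _ [] le_rfl

theorem count_go_repw (t : List Char) (ht : t ≠ []) :
    ∀ (k fuel acc : Nat), (repw t k).length ≤ fuel →
      PySem.Chars.count.go t fuel (repw t k) acc = acc + k := by
  intro k
  induction k with
  | zero =>
    intro fuel acc _
    have h0 : repw t 0 = [] := rfl
    rw [h0]
    cases fuel with
    | zero => rfl
    | succ f => rfl
  | succ k ih =>
    intro fuel acc hf
    have hpos : 0 < t.length := List.length_pos_iff.mpr ht
    have hlen : (repw t (k+1)).length = (k+1) * t.length := length_repw t (k+1)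
    obtain ⟨c, ts, hct⟩ := List.exists_cons_of_ne_nil ht
    cases fuel with
    | zero =>
      exfalso; rw [hlen] at hf
      have := Nat.mul_pos (show 0 < k+1 by omega) hpos
      omega
    | succ f =>
      have hsp : repw t (k+1) = t ++ repw t k := repw_succ t k
      have hcons : repw t (k+1) = c :: (ts ++ repw t k) := by rw [hsp, hct]; rfl
      rw [hcons]
      have hunf : PySem.Chars.count.go t (f+1) (c :: (ts ++ repw t k)) acc =
          (if t.isPrefixOf (c :: (ts ++ repw t k)) then
            PySem.Chars.count.go t f (List.drop t.length (c :: (ts ++ repw t k))) (acc + 1)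
           else PySem.Chars.count.go t f (ts ++ repw t k) acc) := by
        simp [PySem.Chars.count.go]
      rw [hunf]
      have hpre : t.isPrefixOf (c :: (ts ++ repw t k)) = true := by
        rw [List.isPrefixOf_iff_prefix, ← hcons, hsp]
        exact List.prefix_append t (repw t k)
      rw [if_pos hpre]
      have hdrop : List.drop t.length (c :: (ts ++ repw t k)) = repw t k := by
        rw [← hcons, hsp, List.drop_left]
      rw [hdrop]
      rw [ih f (acc+1) (by rw [hsp] at hf; simp [List.length_append] at hf; omega)]
      omega

theorem count_repw (t : List Char) (k : Nat) (ht : t ≠ []) :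
    PySem.Chars.count (repw t k) t = k := by
  have hne : t.isEmpty = false := by simp [List.isEmpty_eq_false_iff, ht]
  rw [PySem.Chars.count, hne]
  simp only [Bool.false_eq_true, if_false]
  rw [count_go_repw t ht k _ 0 le_rfl]
  omega

theorem slice_toList_take (s : String) (a : Nat) :
    (PySem.Str.slice s none (some (a : Int))).toList = s.toList.take a := by
  rw [PySem.Str.toList_slice]
  rw [PySem.Chars.slice_eq_listSlice, PySem.List.slice_to s.toList (by positivity)]
  simp

theorem getRepLoop_spec (s : String) (hne : s.toList ≠ []) (p0 : Nat)
    (hp1 : 1 ≤ p0) (hdvd : p0 ∣ s.toList.length) (hper : PerP s.toList p0)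
    (hmin : ∀ j, 1 ≤ j → j < p0 → ¬(j ∣ s.toList.length ∧ PerP s.toList j)) :
    ∀ (m a : Nat), 1 ≤ a → a ≤ p0 →
      getRepLoop s (s.toList.length : Int) ((List.range' a m).map (fun (j : Nat) => (j : Int))) =
        if p0 < a + m then ((s.toList.length / p0 : Nat) : Int) else 1 := by
  have hnpos : 0 < s.toList.length := List.length_pos_iff.mpr hne
  have hp0n : p0 ≤ s.toList.length := Nat.le_of_dvd hnpos hdvd
  intro m
  induction m with
  | zero =>
    intro a ha1 hap
    rw [List.range'_zero, List.map_nil]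
    rw [if_neg (by omega)]
    rfl
  | succ m ih =>
    intro a ha1 hap
    rw [List.range'_succ, List.map_cons]
    have han : a ≤ s.toList.length := le_trans hap hp0n
    have htake_len : (s.toList.take a).length = a := by
      rw [List.length_take]; omega
    have htake_ne : s.toList.take a ≠ [] := by
      intro h
      rw [h] at htake_len
      simp at htake_len
      omega
    -- the two loop conditions
    have hmodiff : (PySem.Int.mod (s.toList.length : Int) (a : Int) = 0) ↔ a ∣ s.toList.length := by
      rw [PySem.Int.mod_natCast]
      rw [Int.natCast_eq_zero]
      exact Nat.dvd_iff_mod_eq_zero.symm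
    have hrepiff : (PySem.Str.len (PySem.Str.replace s (PySem.Str.slice s none (some (a:Int))) "") = 0)
        ↔ PerP s.toList a := by
      rw [PySem.Str.len_eq, Int.natCast_eq_zero, List.length_eq_zero_iff]
      rw [PySem.Str.toList_replace, slice_toList_take]
      have hemp : ("" : String).toList = [] := rfl
      rw [hemp]
      exact replace_empty_iff s.toList (s.toList.take a) htake_ne
    show (if PySem.Int.mod (s.toList.length : Int) (a:Int) = 0 then _ else _) = _
    by_cases hd : a ∣ s.toList.length
    · rw [if_pos (hmodiff.mpr hd)]
      by_cases hp : PerP s.toList a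
      · rw [if_pos (hrepiff.mpr hp)]
        -- first qualifying index: a = p0
        have hae : a = p0 := by
          by_contra hne'
          exact hmin a ha1 (by omega) ⟨hd, hp⟩
        obtain ⟨k, hk⟩ := hp
        have hcnt : PySem.Str.count s (PySem.Str.slice s none (some (a:Int))) = k := by
          have hc := count_repw (s.toList.take a) k htake_ne
          rw [← hk] at hc
          rw [PySem.Str.count_eq, slice_toList_take]
          exact hc
        rw [hcnt]
        have hklen : s.toList.length = k * a := by
          conv_lhs => rw [hk]
          rw [length_repw, htake_len]
        have : s.toList.length / p0 = k := by
          rw [← hae, hklen, Nat.mul_div_cancel k (by omega)]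
        rw [this, if_pos (by omega)]
      · rw [if_neg (by intro h; exact hp (hrepiff.mp h))]
        have hlt : a < p0 := by
          rcases Nat.lt_or_ge a p0 with h | h
          · exact h
          · exfalso
            have : a = p0 := by omega
            subst this
            exact hp hper
        rw [ih (a+1) (by omega) hlt]
        have : a + (m+1) = (a+1) + m := by omega
        rw [this]
    · rw [if_neg (by intro h; exact hd (hmodiff.mp h))]
      have hlt : a < p0 := by
        rcases Nat.lt_or_ge a p0 with h | h
        · exact h
        · exfalso
          have : a = p0 := by omega
          subst this
          exact hd hdvd
      rw [ih (a+1) (by omega) hlt]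
      have : a + (m+1) = (a+1) + m := by omega
      rw [this]

theorem get_rep_eq (s : String) : get_repetition s = get_repetition_alt s := by
  by_cases hs : s = ""
  · subst hs
    rfl
  · have hne : s.toList ≠ [] := by
      intro h
      exact hs (String.toList_eq_nil_iff.mp h)
    have hnpos : 0 < s.toList.length := List.length_pos_iff.mpr hne
    set cs := s.toList with hcs
    set n := cs.length with hn
    -- the minimal divisor-period p0
    have HQ : ∃ j, 1 ≤ j ∧ j ∣ n ∧ cs.rotate j = cs :=
      ⟨n, hnpos, dvd_refl n, List.rotate_length cs⟩
    classical
    let p0 := Nat.find HQ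
    obtain ⟨hp1, hdvd, hrot⟩ := Nat.find_spec HQ
    have hp0n : p0 ≤ n := Nat.le_of_dvd hnpos hdvd
    have hper : PerP cs p0 := rot_imp cs p0 hp1 hp0n hdvd hrot
    have hmin : ∀ j, 1 ≤ j → j < p0 → ¬(j ∣ n ∧ PerP cs j) := by
      intro j hj1 hjlt ⟨hjd, hjp⟩
      have hjn : j ≤ n := Nat.le_of_dvd hnpos hjd
      have := (per_imp cs j hj1 hjn hjp).2
      exact Nat.find_min HQ hjlt ⟨hj1, hjd, this⟩
    -- ===== B's value =====
    have hk2n : (1:Nat) ≤ (cs ++ cs).length := by rw [List.length_append]; omega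
    have hFne : PySem.Chars.findFrom (cs ++ cs) cs ((1:Nat) : Int) none ≠ -1 := by
      rw [Ne, PySem.Chars.findFrom_natCast_eq_neg_one_iff (cs ++ cs) cs 1 hk2n]
      push Not
      have hdrop : (cs ++ cs).drop 1 = cs.drop 1 ++ cs :=
        List.drop_append_of_le_length (by omega)
      rw [hdrop]
      exact (List.suffix_append (cs.drop 1) cs).isInfix
    obtain ⟨hF1, hFpre, hFmin⟩ :=
      PySem.Chars.findFrom_natCast_spec (cs ++ cs) cs 1 hk2n hFne
    set F := PySem.Chars.findFrom (cs ++ cs) cs ((1:Nat) : Int) none with hFdef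
    have hF0 : 0 ≤ F := le_trans (by norm_num) hF1
    set P := F.toNat with hPdef
    have hFP : F = (P : Int) := (Int.toNat_of_nonneg hF0).symm
    have hP1 : 1 ≤ P := by omega
    have hPn : P ≤ n := by
      by_contra hlt
      push Not at hlt
      have := hFmin n (by omega) (by omega)
      have hdn : (cs ++ cs).drop n = cs := by
        rw [hn, List.drop_left]
      rw [hdn] at this
      exact this (List.prefix_refl cs)
    have hProt : cs.rotate P = cs := (cond_equiv cs P hPn).mp hFpre
    have hPdvd : P ∣ n := by
      rcases Nat.eq_zero_or_pos (n % P) with h0 | hpos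
      · exact Nat.dvd_of_mod_eq_zero h0
      · exfalso
        have hmul : cs.rotate (P * (n / P)) = cs := rotate_mul cs P hProt _
        have hrotr : cs.rotate (n % P) = cs := by
          have h1 : cs.rotate n = cs := by rw [hn]; exact List.rotate_length cs
          have h2 : n = P * (n / P) + n % P := (Nat.div_add_mod n P).symm
          calc cs.rotate (n % P) = (cs.rotate (P * (n / P))).rotate (n % P) := by rw [hmul]
            _ = cs.rotate (P * (n / P) + n % P) := List.rotate_rotate _ _ _
            _ = cs.rotate n := by rw [← h2]
            _ = cs := h1
        have hrP : n % P < P := Nat.mod_lt n (by omega)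
        have := hFmin (n % P) (by omega) (by omega)
        exact this ((cond_equiv cs (n % P) (by omega)).mpr hrotr)
    -- p0 = P
    have hle1 : p0 ≤ P := Nat.find_min' HQ ⟨hP1, hPdvd, hProt⟩
    have hle2 : P ≤ p0 := by
      by_contra hlt
      push Not at hlt
      have := hFmin p0 (by omega) (by omega)
      exact this ((cond_equiv cs p0 hp0n).mpr hrot)
    have hPeq : P = p0 := by omega
    -- ===== evaluate B =====
    have hB : get_repetition_alt s = ((n / p0 : Nat) : Int) := by
      rw [get_repetition_alt, if_neg hs]
      rw [PySem.Str.len_eq, PySem.Str.findFrom_eq, String.toList_append]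
      have h1 : (1 : Int) = ((1:Nat) : Int) := by norm_num
      rw [h1, ← hcs, ← hFdef, hFP, hPeq, ← hn]
      exact PySem.Int.floordiv_natCast n p0
    -- ===== evaluate A =====
    have hA : get_repetition s = ((n / p0 : Nat) : Int) := by
      rw [get_repetition, PySem.Str.len_eq, ← hcs, ← hn]
      have h2 : (2 : Int) = ((2:Nat) : Int) := by norm_num
      have hfd : PySem.Int.floordiv (n : Int) 2 = ((n / 2 : Nat) : Int) := by
        rw [h2]; exact PySem.Int.floordiv_natCast n 2
      rw [hfd]
      have hrange : PySem.List.pyRange 1 (((n / 2 : Nat) : Int) + 1) =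
          (List.range' 1 (n / 2)).map (fun (j : Nat) => (j : Int)) := by
        rw [PySem.List.pyRange_one]
        have ht : (((n / 2 : Nat) : Int) + 1 - 1).toNat = n / 2 := by omega
        rw [ht, List.range'_eq_map_range, List.map_map]
        apply List.map_congr_left
        intro x _
        simp
      rw [hrange]
      rw [getRepLoop_spec s hne p0 hp1 hdvd hper hmin (n/2) 1 le_rfl hp1]
      by_cases hcase : p0 < 1 + n / 2
      · rw [if_pos hcase]
      · rw [if_neg hcase]
        push Not at hcase
        -- p0 > n/2 and p0 ∣ n forces p0 = n
        have hp0eq : p0 = n := by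
          obtain ⟨c, hc⟩ := hdvd
          rcases Nat.lt_or_ge c 2 with hc2 | hc2
          · interval_cases c
            · omega
            · omega
          · exfalso
            have : 2 * p0 ≤ n := by
              calc 2 * p0 = p0 * 2 := by ring
                _ ≤ p0 * c := Nat.mul_le_mul_left p0 hc2
                _ = n := hc.symm
            have : p0 ≤ n / 2 := by omega
            omega
        rw [hp0eq, Nat.div_self hnpos]
        norm_num
    rw [hA, hB]

-- ===== VERDICT (by name: the statement is the Claim_ definition above) =====
theorem get_repetition_spec : Claim_equal_get_repetition := by
  intro s _
  unfold Spec_get_repetition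
  exact get_rep_eq s
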